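-- pv_equiv track=rewrite | github.com/nyomanjuniarta/Sampling | src/algo1a.py | supportCalculatorLong
-- ===== SOURCE A (Python) =====
-- def subseqChecker(subseq,seq):
--     seqSize = len(seq)
--     subSize = len(subseq)
--     if subSize > seqSize:
--         return False
--     isSubset = False
--     itemsetCounter = 0
--     itemset = subseq[itemsetCounter]
--     for i in range(0,seqSize):
--         if seq[i].issuperset(itemset):
--             itemsetCounter += 1
--             if itemsetCounter == subSize:
--                 isSubset = True
--                 break
--             itemset = subseq[itemsetCounter]
--     return isSubset
--
-- def supportCalculatorLong(dataset,subseq):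
--     if len(subseq) == 0:
--         return len(dataset)
--     support = 0
--     for seq in dataset:
--         if subseqChecker(subseq, seq):
--             support += 1
--     return support
-- ===== SOURCE B (Python) =====
-- def supportCalculatorLong(dataset, subseq):
--     need = list(reversed(subseq))
--     support = 0
--     for seq in dataset:
--         rem = need
--         for s in reversed(seq):
--             if rem and s.issuperset(rem[0]):
--                 rem = rem[1:]
--         if not rem:
--             support += 1
--     return support
-- ===== Notes on version B (the rewrite author's own statement) =====
-- stated objective: alternative
-- what changed: B matches each sequence right-to-left: the subsequence is reversed once and a remaining-items list is consumed while scanning the sequence backwards (success = list emptied), instead of A's forward indexed scan with an integer pointer and early break; correctness rests on the reversal-invariance of subsequence embeddings, proved in Lean.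
import Mathlib
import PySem

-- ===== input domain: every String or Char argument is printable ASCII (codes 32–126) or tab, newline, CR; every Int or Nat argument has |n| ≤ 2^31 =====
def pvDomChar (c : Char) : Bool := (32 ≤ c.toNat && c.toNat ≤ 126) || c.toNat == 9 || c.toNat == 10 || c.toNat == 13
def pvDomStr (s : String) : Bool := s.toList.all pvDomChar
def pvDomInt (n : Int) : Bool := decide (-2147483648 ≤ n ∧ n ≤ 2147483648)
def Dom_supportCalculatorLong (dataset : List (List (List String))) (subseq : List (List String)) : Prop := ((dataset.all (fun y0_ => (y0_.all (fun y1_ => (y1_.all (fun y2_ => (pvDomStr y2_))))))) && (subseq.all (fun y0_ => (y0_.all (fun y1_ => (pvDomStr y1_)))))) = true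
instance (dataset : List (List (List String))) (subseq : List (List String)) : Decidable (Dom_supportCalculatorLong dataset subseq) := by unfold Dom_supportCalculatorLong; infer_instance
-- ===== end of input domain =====

-- B matches each sequence RIGHT-TO-LEFT (reversed subsequence consumed against a backwards scan)
-- instead of A's forward indexed scan with an integer pointer; equal by reversal-invariance of
-- subsequence embeddings, proved below. Objective: alternative algorithm, same cost.


-- ===== PORT A =====
-- seq[i].issuperset(itemset): every element of the set itemset is in the set seq[i]
def pvIssuperset (s itemset : List String) : Bool := itemset.all (fun x => s.contains x)

-- the for-i loop of subseqChecker: remaining sequence elements, current itemsetCounter c;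
-- itemset = subseq[c] is re-read via getD (always in bounds when read, as in the Python)
def pvCheckLoop (subseq : List (List String)) : List (List String) → Nat → Bool
  | [], _ => false
  | s :: ss, c =>
    if pvIssuperset s (subseq.getD c []) then
      if c + 1 = subseq.length then true   -- break with isSubset = True
      else pvCheckLoop subseq ss (c + 1)
    else pvCheckLoop subseq ss c

def subseqChecker (subseq seq : List (List String)) : Bool :=
  if subseq.length > seq.length then false
  else pvCheckLoop subseq seq 0

def supportCalculatorLong (dataset : List (List (List String))) (subseq : List (List String)) : Int :=
  if subseq.length = 0 then (dataset.length : Int)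
  else dataset.foldl (fun support seq => if subseqChecker subseq seq then support + 1 else support) 0

-- ===== PORT B =====
-- one step of B's inner loop: consume the head of the remaining-items list if this
-- sequence element (taken from the back) is a superset of it
def pvConsume (rem : List (List String)) (s : List String) : List (List String) :=
  match rem with
  | [] => []
  | item :: rest => if pvIssuperset s item then rest else item :: rest

def supportCalculatorLong_alt (dataset : List (List (List String))) (subseq : List (List String)) : Int :=
  let need := subseq.reverse
  dataset.foldl (fun support seq =>
    if seq.reverse.foldl pvConsume need = [] then support + 1 else support) 0

-- ===== PRECONDITION & SPEC =====
def Spec_supportCalculatorLong (dataset : List (List (List String))) (subseq : List (List String)) (out : Int) : Prop := out = supportCalculatorLong_alt dataset subseq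
instance (dataset : List (List (List String))) (subseq : List (List String)) (out : Int) : Decidable (Spec_supportCalculatorLong dataset subseq out) := by unfold Spec_supportCalculatorLong; infer_instance

-- ===== CLAIM (what is proved, stated in full; the proofs are below) =====
def Claim_equal_supportCalculatorLong : Prop := ∀ (dataset : List (List (List String))) (subseq : List (List String)), Dom_supportCalculatorLong dataset subseq → Spec_supportCalculatorLong dataset subseq (supportCalculatorLong dataset subseq)

-- ===== LEMMAS AND PROOFS =====

-- proof-only reference algorithm: the left-to-right greedy scan
def pvCovers : List (List String) → List (List String) → Bool
  | [], _ => true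
  | _ :: _, [] => false
  | item :: rest, s :: ss =>
    if pvIssuperset s item then pvCovers rest ss else pvCovers (item :: rest) ss

-- the matching relation itself: an order-preserving embedding of the items into the sequence
def pvEmb (items seq : List (List String)) : Prop :=
  ∃ l, l.Sublist seq ∧ List.Forall₂ (fun item s => pvIssuperset s item = true) items l

-- ---- A's pointer loop = left greedy ----
theorem covers_false_of_long : ∀ (a b : List (List String)), b.length < a.length → pvCovers a b = false := by
  intro a b
  induction b generalizing a with
  | nil => intro h; cases a with
    | nil => simp at h
    | cons x xs => simp [pvCovers]
  | cons s ss ih =>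
    intro h
    cases a with
    | nil => simp at h
    | cons item rest =>
      simp only [pvCovers]
      split
      · exact ih rest (by simpa using Nat.lt_of_succ_lt_succ h)
      · exact ih (item :: rest) (Nat.lt_of_succ_lt_succ h |>.trans (Nat.lt_succ_self _))

theorem checkLoop_eq_covers (subseq : List (List String)) :
    ∀ (seq : List (List String)) (c : Nat), c < subseq.length →
      pvCheckLoop subseq seq c = pvCovers (subseq.drop c) seq := by
  intro seq
  induction seq with
  | nil =>
    intro c hc
    have : subseq.drop c ≠ [] := by
      intro h; have := List.drop_eq_nil_iff.mp h; omega
    cases hd : subseq.drop c with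
    | nil => exact absurd hd this
    | cons x xs => simp [pvCheckLoop, pvCovers]
  | cons s ss ih =>
    intro c hc
    have hd : subseq.drop c = subseq[c] :: subseq.drop (c + 1) :=
      List.drop_eq_getElem_cons hc
    have hget : subseq.getD c [] = subseq[c] := List.getD_eq_getElem _ _ hc
    simp only [pvCheckLoop, hd, pvCovers, hget]
    split
    · by_cases hend : c + 1 = subseq.length
      · have : subseq.drop (c + 1) = [] := by simp [hend]
        simp [hend, pvCovers]
      · have hlt : c + 1 < subseq.length := by omega
        simp [hend, ih (c + 1) hlt]
    · rw [ih c hc, hd]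

theorem checker_eq_covers (subseq seq : List (List String)) (h : subseq ≠ []) :
    subseqChecker subseq seq = pvCovers subseq seq := by
  unfold subseqChecker
  split
  · exact (covers_false_of_long subseq seq (by omega)).symm
  · have hpos : 0 < subseq.length := List.length_pos_iff.mpr h
    simpa using checkLoop_eq_covers subseq seq 0 hpos

-- ---- greedy is sound and complete for the embedding relation ----
theorem covers_sound : ∀ (seq items : List (List String)), pvCovers items seq = true → pvEmb items seq := by
  intro seq
  induction seq with
  | nil =>
    intro items h
    cases items with
    | nil => exact ⟨[], List.Sublist.refl _, List.Forall₂.nil⟩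
    | cons i is => simp [pvCovers] at h
  | cons s ss ih =>
    intro items h
    cases items with
    | nil => exact ⟨[], List.nil_sublist _, List.Forall₂.nil⟩
    | cons i is =>
      simp only [pvCovers] at h
      by_cases hs : pvIssuperset s i = true
      · rw [if_pos hs] at h
        obtain ⟨l, hl, hf⟩ := ih is h
        exact ⟨s :: l, List.Sublist.cons₂ _ hl, List.Forall₂.cons hs hf⟩
      · rw [if_neg hs] at h
        obtain ⟨l, hl, hf⟩ := ih (i :: is) h
        exact ⟨l, List.Sublist.cons _ hl, hf⟩

theorem covers_complete : ∀ (seq items : List (List String)), pvEmb items seq → pvCovers items seq = true := by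
  intro seq
  induction seq with
  | nil =>
    intro items ⟨l, hl, hf⟩
    have : l = [] := List.sublist_nil.mp hl
    subst this
    have : items = [] := List.forall₂_nil_right_iff.mp hf
    subst this
    simp [pvCovers]
  | cons s ss ih =>
    intro items ⟨l, hl, hf⟩
    cases items with
    | nil => simp [pvCovers]
    | cons i is =>
      obtain ⟨x, l', rfl, hxi⟩ : ∃ x l', l = x :: l' ∧ pvIssuperset x i = true := by
        cases hf with
        | cons hh ht => exact ⟨_, _, rfl, hh⟩
      have hf' : List.Forall₂ (fun item s => pvIssuperset s item = true) is l' := by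
        cases hf with | cons _ ht => exact ht
      simp only [pvCovers]
      by_cases hs : pvIssuperset s i = true
      · rw [if_pos hs]
        -- embedding of is into ss: either x = s (use l'), or x::l' <+ ss (use its tail l')
        cases hl with
        | cons _ h2 =>
          have hl' : l'.Sublist ss := (List.sublist_cons_self x l').trans h2
          exact ih is ⟨l', hl', hf'⟩
        | cons₂ _ h2 => exact ih is ⟨l', h2, hf'⟩
      · rw [if_neg hs]
        cases hl with
        | cons _ h2 => exact ih (i :: is) ⟨x :: l', h2, hf⟩
        | cons₂ _ h2 => exact absurd hxi hs
      -- (in the cons₂ case above x = s, so pvIssuperset s i holds, contradicting hs)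

theorem covers_iff_emb (items seq : List (List String)) : pvCovers items seq = true ↔ pvEmb items seq :=
  ⟨covers_sound seq items, covers_complete seq items⟩

-- ---- the embedding relation is reversal-invariant ----
theorem emb_reverse (items seq : List (List String)) : pvEmb items.reverse seq.reverse ↔ pvEmb items seq := by
  constructor
  · rintro ⟨l, hl, hf⟩
    refine ⟨l.reverse, ?_, ?_⟩
    · have := hl.reverse; simpa using this
    · have := List.rel_reverse hf
      simpa using this
  · rintro ⟨l, hl, hf⟩
    exact ⟨l.reverse, hl.reverse, List.rel_reverse hf⟩

-- ---- B's fold = left greedy on the reversed lists ----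
theorem foldl_consume_nil : ∀ (L : List (List String)), L.foldl pvConsume [] = [] := by
  intro L; induction L with
  | nil => rfl
  | cons s ss ih => simpa [pvConsume] using ih

theorem foldl_consume_eq_covers :
    ∀ (L I : List (List String)), (L.foldl pvConsume I = []) ↔ pvCovers I L = true := by
  intro L
  induction L with
  | nil =>
    intro I
    cases I with
    | nil => simp [pvCovers]
    | cons i is => simp [pvCovers]
  | cons s ss ih =>
    intro I
    cases I with
    | nil => simp [pvConsume, pvCovers, foldl_consume_nil]
    | cons i is =>
      simp only [List.foldl, pvConsume, pvCovers]
      by_cases hs : pvIssuperset s i = true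
      · rw [if_pos hs, if_pos hs]; exact ih is
      · rw [if_neg hs, if_neg hs]; exact ih (i :: is)

-- B's per-sequence test agrees with A's checker
theorem alt_test_eq_checker (subseq seq : List (List String)) (h : subseq ≠ []) :
    (seq.reverse.foldl pvConsume subseq.reverse = []) ↔ subseqChecker subseq seq = true := by
  rw [foldl_consume_eq_covers, covers_iff_emb, emb_reverse, ← covers_iff_emb,
      checker_eq_covers subseq seq h]

-- the accumulator loop counts exactly countP
theorem foldl_count (p : List (List String) → Prop) [DecidablePred p] :
    ∀ (l : List (List (List String))) (a : Int),
      l.foldl (fun support seq => if p seq then support + 1 else support) a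
        = a + (l.countP (fun s => decide (p s)) : Int) := by
  intro l
  induction l with
  | nil => intro a; simp
  | cons x xs ih =>
    intro a
    simp only [List.foldl, List.countP_cons]
    by_cases hx : p x <;> simp [hx, ih, add_comm, add_assoc]

-- ===== VERDICT (by name: the statement is the Claim_ definition above) =====
theorem supportCalculatorLong_spec : Claim_equal_supportCalculatorLong := by
  intro dataset subseq _
  unfold Spec_supportCalculatorLong supportCalculatorLong supportCalculatorLong_alt
  simp only []
  split
  · next hnil =>
    have : subseq = [] := List.length_eq_zero_iff.mp hnil
    subst this
    rw [foldl_count]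
    have hcount : dataset.countP (fun seq => decide (List.foldl pvConsume ([] : List (List String)).reverse seq.reverse = [])) = dataset.length := by
      rw [List.countP_eq_length]
      intro seq _
      simp only [List.reverse_nil, foldl_consume_nil, decide_eq_true_eq]
    rw [hcount]
    ring
  · next hne =>
    have h : subseq ≠ [] := by
      intro h; subst h; simp at hne
    rw [foldl_count, foldl_count]
    congr 2
    apply List.countP_congr
    intro seq _
    simp only [decide_eq_true_eq]
    constructor
    · intro hchk
      exact (alt_test_eq_checker subseq seq h).mpr hchk
    · intro halt
      exact (alt_test_eq_checker subseq seq h).mp halt
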